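-- pv_equiv track=rewrite | github.com/ebby-s/ALevelCS | Python Challenges/ebbyAS18.py | day_add
-- ===== SOURCE A (Python) =====
-- days = ["Sunday","Monday","Tuesday","Wednesday","Thursday","Friday","Saturday"]
--
-- def day_add (day,delta):
--     delta = delta % 7
--     if delta < 0:
--         delta = 7 - delta
--     for i in range(0,7,1):
--         if i == 6:
--             i = -1
--         if day == days[i]:
--             if i+delta>6:
--                 i=i-7
--             return(days[i+delta])
-- ===== SOURCE B (Python) =====
-- days = ["Sunday","Monday","Tuesday","Wednesday","Thursday","Friday","Saturday"]
--
-- def day_add(day, delta):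
--     k = delta % 7
--     shifted = days[k:] + days[:k]
--     return dict(zip(days, shifted)).get(day)
-- ===== Notes on version B (the rewrite author's own statement) =====
-- stated objective: alternative
-- what changed: Instead of scanning for the day's index and offsetting it, B rotates the week list by delta%7, zips it with the original into a day->shifted-day table, and answers with one dict lookup; no index arithmetic at lookup time.
-- outside the precondition, e.g. on day_add('Holiday', 3): A returns None, B returns None
import Mathlib
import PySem

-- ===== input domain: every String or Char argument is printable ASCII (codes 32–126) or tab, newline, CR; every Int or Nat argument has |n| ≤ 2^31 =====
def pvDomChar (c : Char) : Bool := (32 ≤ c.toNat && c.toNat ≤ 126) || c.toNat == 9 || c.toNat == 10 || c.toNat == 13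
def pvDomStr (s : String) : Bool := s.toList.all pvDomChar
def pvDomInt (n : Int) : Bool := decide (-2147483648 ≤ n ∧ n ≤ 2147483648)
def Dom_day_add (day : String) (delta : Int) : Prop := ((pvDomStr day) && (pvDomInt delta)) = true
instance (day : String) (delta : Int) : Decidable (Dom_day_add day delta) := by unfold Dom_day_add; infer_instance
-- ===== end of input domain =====

-- B answers via a rotate-then-zip lookup table instead of A's indexed scan with wrap-around (alternative; return value only).


-- ===== PORT A =====
def daysA : List String := ["Sunday","Monday","Tuesday","Wednesday","Thursday","Friday","Saturday"]

-- the 'for i in range(0,7,1)' loop; falling off the loop is Python's implicit None (outside Pre_), "" here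
def dayAddLoop (day : String) (delta : Int) : List Int → String
  | [] => ""
  | i :: rest =>
    let i' := if i = 6 then (-1 : Int) else i
    if PySem.List.pyGet? daysA i' = some day then
      let i'' := if i' + delta > 6 then i' - 7 else i'
      (PySem.List.pyGet? daysA (i'' + delta)).getD ""   -- in range for every matched day (Pre_), so getD never fires
    else dayAddLoop day delta rest

def day_add (day : String) (delta : Int) : String :=
  let d := PySem.Int.mod delta 7
  let d := if d < 0 then 7 - d else d
  dayAddLoop day d (PySem.List.pyRange 0 7 1)

-- ===== PORT B =====
def daysB : List String := ["Sunday","Monday","Tuesday","Wednesday","Thursday","Friday","Saturday"]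

def day_add_alt (day : String) (delta : Int) : String :=
  let k := PySem.Int.mod delta 7                                   -- k = delta % 7
  let shifted := PySem.List.slice daysB (some k) none
              ++ PySem.List.slice daysB none (some k)              -- days[k:] + days[:k]
  ((PySem.Dict.ofList (daysB.zip shifted)).get? day).getD ""       -- dict(zip(days, shifted)).get(day); None (unknown day) is outside Pre_

-- ===== PRECONDITION & SPEC =====
-- Pre_ excludes day strings that are not one of the seven weekday names: there A falls
-- through the loop and returns None, which is not a value of the declared String return type.
def Pre_day_add (day : String) (delta : Int) : Prop :=
  day ∈ (["Sunday","Monday","Tuesday","Wednesday","Thursday","Friday","Saturday"] : List String)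
instance (day : String) (delta : Int) : Decidable (Pre_day_add day delta) := by unfold Pre_day_add; infer_instance
def pvWitness_day_add : String × Int := ("Wednesday", -3)

def Spec_day_add (day : String) (delta : Int) (out : String) : Prop := out = day_add_alt day delta
instance (day : String) (delta : Int) (out : String) : Decidable (Spec_day_add day delta out) := by unfold Spec_day_add; infer_instance

-- ===== CLAIM (what is proved, stated in full; the proofs are below) =====
def Claim_equal_day_add : Prop := ∀ (day : String) (delta : Int), Dom_day_add day delta → Pre_day_add day delta → Spec_day_add day delta (day_add day delta)

-- ===== LEMMAS AND PROOFS =====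

-- ===== VERDICT (by name: the statement is the Claim_ definition above) =====
set_option maxHeartbeats 2000000 in
theorem day_add_spec : Claim_equal_day_add := by
  intro day delta _ hpre
  unfold Spec_day_add
  have hmod : PySem.Int.mod delta 7 = delta % 7 := by
    simp [PySem.Int.mod, Int.fmod_eq_emod]
  have h2 : delta % 7 = 0 ∨ delta % 7 = 1 ∨ delta % 7 = 2 ∨ delta % 7 = 3 ∨
      delta % 7 = 4 ∨ delta % 7 = 5 ∨ delta % 7 = 6 := by omega
  simp only [Pre_day_add, List.mem_cons, List.not_mem_nil, or_false] at hpre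
  rcases hpre with h|h|h|h|h|h|h <;> subst h <;>
    rcases h2 with h2|h2|h2|h2|h2|h2|h2 <;>
      (simp [day_add, day_add_alt, dayAddLoop, hmod, h2, daysA, daysB,
        PySem.List.pyGet?, PySem.List.pyIdx?, PySem.List.pyRange]; try decide)
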